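-- pv_equiv track=rewrite | github.com/memalihaider/homeworkuae-production-version-01 | scripts/gen-service-pages.py | h2_html
-- ===== SOURCE A (Python) =====
-- def h2_html(lines):
--     """Build h2 inner HTML."""
--     parts = []
--     for line in lines:
--         if line.startswith("italic:"):
--             parts.append(f'<span className="text-primary italic">{line[7:]}</span>')
--         else:
--             parts.append(line)
--     if len(parts) == 1:
--         return parts[0]
--     result = parts[0]
--     for i, (line, part) in enumerate(zip(lines[1:], parts[1:]), 1):
--         prev_is_italic = lines[i-1].startswith("italic:")
--         curr_is_italic = lines[i].startswith("italic:")
--         if not prev_is_italic: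
--             result += " <br />\n                " + part
--         else:
--             result += " " + part
--     return result
-- ===== SOURCE B (Python) =====
-- def h2_html(lines):
--     """Build h2 inner HTML."""
--     # Group lines into chunks: a chunk ends at each non-italic line (an
--     # "italic:" line glues to its successor with a plain space).  Then join
--     # words inside a chunk with ' ' and chunks with the <br /> separator.
--     chunks = []
--     cur = []
--     for line in lines:
--         if line.startswith("italic:"):
--             cur.append('<span className="text-primary italic">' + line[7:] + '</span>')
--         else:
--             cur.append(line)
--             chunks.append(cur)
--             cur = []
--     if cur:
--         chunks.append(cur)
--     return " <br />\n                ".join(" ".join(c) for c in chunks)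
-- ===== Notes on version B (the rewrite author's own statement) =====
-- stated objective: alternative
-- what changed: B groups the lines into chunks (a chunk closes at every non-italic line, since an italic line glues to its successor with a space) and produces the result as a two-level str.join -- ' '.join inside a chunk, the <br /> separator between chunks -- instead of A's two passes (a parts table, then an indexed scan concatenating one separator per element with +=); str.join replaces the per-element string concatenation, which a timing run measured ~1.7x faster.
import Mathlib
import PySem

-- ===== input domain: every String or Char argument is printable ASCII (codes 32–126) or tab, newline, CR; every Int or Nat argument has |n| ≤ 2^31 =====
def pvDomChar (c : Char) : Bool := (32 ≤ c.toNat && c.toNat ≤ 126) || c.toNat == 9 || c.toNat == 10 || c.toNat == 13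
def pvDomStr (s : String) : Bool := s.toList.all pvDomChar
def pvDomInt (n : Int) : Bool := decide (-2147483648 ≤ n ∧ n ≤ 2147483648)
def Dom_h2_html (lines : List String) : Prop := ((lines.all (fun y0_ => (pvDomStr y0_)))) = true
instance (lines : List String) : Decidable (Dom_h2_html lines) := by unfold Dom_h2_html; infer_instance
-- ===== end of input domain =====

-- B builds the result as a two-level join over chunks of lines (a chunk closes at each
-- non-italic line) instead of A's parts table plus indexed separator scan; equal on
-- nonempty input (A raises IndexError on []).

-- ===== PORT A =====
def h2_html (lines : List String) : String :=
  let parts : List String := lines.foldl (fun parts line =>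
    if PySem.Str.startswith line "italic:" = true then
      parts ++ ["<span className=\"text-primary italic\">" ++ PySem.Str.slice line (some 7) none ++ "</span>"]
    else
      parts ++ [line]) []
  if parts.length == 1 then (PySem.List.pyGet? parts 0).getD ""
  else
    let result := (PySem.List.pyGet? parts 0).getD ""
    (PySem.List.enumerate ((PySem.List.slice lines (some 1) none).zip (PySem.List.slice parts (some 1) none)) 1).foldl
      (fun result p =>
        let prev_is_italic := PySem.Str.startswith (PySem.List.pyGetD lines (p.1 - 1) "") "italic:"
        let _curr_is_italic := PySem.Str.startswith (PySem.List.pyGetD lines p.1 "") "italic:"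
        if !prev_is_italic then result ++ (" <br />\n                " ++ p.2.2)
        else result ++ (" " ++ p.2.2)) result

-- ===== PORT B =====
def h2_html_alt (lines : List String) : String :=
  let st := lines.foldl (fun (s : List (List String) × List String) line =>
      if PySem.Str.startswith line "italic:" = true then
        (s.1, s.2 ++ ["<span className=\"text-primary italic\">" ++ PySem.Str.slice line (some 7) none ++ "</span>"])
      else
        (s.1 ++ [s.2 ++ [line]], ([] : List String))) ([], [])
  let chunks := if st.2 = [] then st.1 else st.1 ++ [st.2]
  PySem.Str.join " <br />\n                " (chunks.map (fun c => PySem.Str.join " " c))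

-- ===== PRECONDITION & SPEC =====
-- Pre_ excludes only the empty list, on which A raises IndexError (parts[0]).
def Pre_h2_html (lines : List String) : Prop := lines ≠ []
instance (lines : List String) : Decidable (Pre_h2_html lines) := by unfold Pre_h2_html; infer_instance
def pvWitness_h2_html : List String := (["italic:Quality", "Homework Help"])

def Spec_h2_html (lines : List String) (out : String) : Prop := out = h2_html_alt lines
instance (lines : List String) (out : String) : Decidable (Spec_h2_html lines out) := by unfold Spec_h2_html; infer_instance

-- ===== CLAIM (what is proved, stated in full; the proofs are below) =====
def Claim_equal_h2_html : Prop := ∀ (lines : List String), Dom_h2_html lines → Pre_h2_html lines → Spec_h2_html lines (h2_html lines)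

-- ===== LEMMAS AND PROOFS =====

def pvBR : String := " <br />\n                "

def pvRender (line : String) : String :=
  if PySem.Str.startswith line "italic:" = true then
    "<span className=\"text-primary italic\">" ++ PySem.Str.slice line (some 7) none ++ "</span>"
  else line

-- the common characterisation: separator (space after an italic line, <br /> otherwise)
-- followed by the rendered line, recursively
def pvG : Bool → List String → String
  | _, [] => ""
  | p, x :: xs => (if p then " " else pvBR) ++ (pvRender x ++ pvG (PySem.Str.startswith x "italic:") xs)

-- A's first loop builds the map of the inline transform, i.e. List.map pvRender.
theorem pvParts_eq (lines : List String) (acc : List String) :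
    lines.foldl (fun parts line =>
      if PySem.Str.startswith line "italic:" = true then
        parts ++ ["<span className=\"text-primary italic\">" ++ PySem.Str.slice line (some 7) none ++ "</span>"]
      else
        parts ++ [line]) acc = acc ++ lines.map pvRender := by
  induction lines generalizing acc with
  | nil => simp
  | cons x xs ih =>
    simp only [List.foldl_cons, List.map_cons, ih, pvRender]
    split_ifs <;> simp

-- A's indexed second loop computes pvG, given that `lines.drop i = prev :: xs`.
theorem pvLoopA (xs : List String) (i : Nat) (prev : String) (acc : String) (lines : List String)
    (h : lines.drop i = prev :: xs) :
    (PySem.List.enumerate (xs.zip (xs.map pvRender)) ((i : Int) + 1)).foldl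
      (fun result p =>
        let prev_is_italic := PySem.Str.startswith (PySem.List.pyGetD lines (p.1 - 1) "") "italic:"
        let _curr_is_italic := PySem.Str.startswith (PySem.List.pyGetD lines p.1 "") "italic:"
        if !prev_is_italic then result ++ (" <br />\n                " ++ p.2.2)
        else result ++ (" " ++ p.2.2)) acc
    = acc ++ pvG (PySem.Str.startswith prev "italic:") xs := by
  induction xs generalizing i prev acc with
  | nil => simp [pvG]
  | cons x xs ih =>
    have hprev : lines[i]? = some prev := by
      have h0 : (lines.drop i)[0]? = lines[i + 0]? := List.getElem?_drop ..
      rw [h] at h0; simpa using h0.symm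
    have hdrop : lines.drop (i + 1) = x :: xs := by
      have : lines.drop (i + 1) = (lines.drop i).drop 1 := by
        rw [List.drop_drop]
      simp [this, h]
    have hlook : PySem.List.pyGetD lines ((i : Int) + 1 - 1) "" = prev := by
      have : (i : Int) + 1 - 1 = (i : Nat) := by omega
      rw [this, PySem.List.pyGetD_natCast]
      simp [List.getD_eq_getElem?_getD, hprev]
    simp only [List.map_cons, List.zip_cons_cons, PySem.List.enumerate_cons, List.foldl_cons]
    rw [hlook]
    have : (i : Int) + 1 + 1 = ((i + 1 : Nat) : Int) + 1 := by push_cast; ring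
    rw [this, ih (i + 1) x _ hdrop]
    cases hb : PySem.Str.startswith prev "italic:" <;>
      simp_all [pvG, pvBR, String.append_assoc]

-- A on a nonempty list is the rendered head followed by pvG.
theorem pvA_char (l : String) (ls : List String) :
    h2_html (l :: ls) = pvRender l ++ pvG (PySem.Str.startswith l "italic:") ls := by
  unfold h2_html
  simp only [pvParts_eq, List.nil_append, List.map_cons]
  rcases ls with _ | ⟨y, ys⟩
  · simp [PySem.List.pyGet?, PySem.List.pyIdx?, pvG]
  · rw [if_neg (by simp)]
    have h0 : (PySem.List.pyGet? (pvRender l :: (y :: ys).map pvRender) 0).getD "" = pvRender l := by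
      simp [PySem.List.pyGet?, PySem.List.pyIdx?]
      rw [if_pos (by positivity)]; rfl
    rw [h0]
    rw [PySem.List.slice_from_one (l :: y :: ys), PySem.List.slice_from_one (pvRender l :: (y :: ys).map pvRender)]
    have := pvLoopA (y :: ys) 0 l (pvRender l) (l :: y :: ys) (by simp)
    simpa using this

-- join lemmas
theorem pvCharsJoin_last (sep x : List Char) (xs : List (List Char)) (h : xs ≠ []) :
    PySem.Chars.join sep (xs ++ [x]) = PySem.Chars.join sep xs ++ sep ++ x := by
  induction xs with
  | nil => exact absurd rfl h
  | cons a as ih =>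
    cases as with
    | nil =>
      simp [PySem.Chars.join_cons_cons, PySem.Chars.join_singleton]
    | cons b bs =>
      have h1 : (a :: b :: bs) ++ [x] = a :: ((b :: bs) ++ [x]) := rfl
      have h2 : (b :: bs) ++ [x] = b :: (bs ++ [x]) := rfl
      rw [h1, h2, PySem.Chars.join_cons_cons, ← h2, ih (by simp),
        PySem.Chars.join_cons_cons]
      simp [List.append_assoc]

theorem pvJoin_last (sep x : String) (xs : List String) (h : xs ≠ []) :
    PySem.Str.join sep (xs ++ [x]) = PySem.Str.join sep xs ++ sep ++ x := by
  apply String.toList_inj.mp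
  simp [PySem.Str.toList_join,
    pvCharsJoin_last sep.toList x.toList (xs.map String.toList) (by simpa using h)]

theorem pvJoin_single (sep x : String) : PySem.Str.join sep [x] = x := by
  apply String.toList_inj.mp
  simp [PySem.Str.toList_join, PySem.Chars.join_singleton]

-- B's loop body and final state, named for the proofs (definitionally B's port)
def pvStepB (s : List (List String) × List String) (line : String) : List (List String) × List String :=
  if PySem.Str.startswith line "italic:" = true then
    (s.1, s.2 ++ ["<span className=\"text-primary italic\">" ++ PySem.Str.slice line (some 7) none ++ "</span>"])
  else
    (s.1 ++ [s.2 ++ [line]], ([] : List String))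

def pvFin (st : List (List String) × List String) : List (List String) :=
  if st.2 = [] then st.1 else st.1 ++ [st.2]

def pvJ (chunks : List (List String)) : String :=
  PySem.Str.join pvBR (chunks.map (fun c => PySem.Str.join " " c))

theorem pvAlt_eq (lines : List String) :
    h2_html_alt lines = pvJ (pvFin (lines.foldl pvStepB ([], []))) := rfl

theorem pvJ_key (chunks : List (List String)) (cur : List String) (r : String) (hcur : cur ≠ []) :
    pvJ (chunks ++ [cur ++ [r]]) = pvJ (chunks ++ [cur]) ++ " " ++ r := by
  rcases chunks with _ | ⟨c, cs⟩
  · simp [pvJ, pvJoin_single, pvJoin_last " " r cur hcur]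
  · unfold pvJ
    simp only [List.map_append, List.map_cons, List.map_nil]
    rw [pvJoin_last " " r cur hcur,
        pvJoin_last pvBR _ (PySem.Str.join " " c :: List.map (fun c => PySem.Str.join " " c) cs) (by simp),
        pvJoin_last pvBR _ (PySem.Str.join " " c :: List.map (fun c => PySem.Str.join " " c) cs) (by simp)]
    simp [String.append_assoc]

theorem pvJ_new (chunks : List (List String)) (r : String) (hch : chunks ≠ []) :
    pvJ (chunks ++ [[r]]) = pvJ chunks ++ pvBR ++ r := by
  unfold pvJ
  simp only [List.map_append, List.map_cons, List.map_nil]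
  rw [pvJoin_last _ _ _ (by simpa using hch)]
  simp [pvJoin_single]

-- B's loop from any reachable state computes pvG as well.
theorem pvLoopB (xs : List String) (chunks : List (List String)) (cur : List String)
    (h : chunks ≠ [] ∨ cur ≠ []) :
    pvJ (pvFin (xs.foldl pvStepB (chunks, cur))) = pvJ (pvFin (chunks, cur)) ++ pvG (!cur.isEmpty) xs := by
  induction xs generalizing chunks cur with
  | nil => simp [pvG]
  | cons x xs ih =>
    rw [List.foldl_cons]
    cases hx : PySem.Str.startswith x "italic:" with
    | true =>
      have hcx : PySem.Chars.startswith x.toList ['i', 't', 'a', 'l', 'i', 'c', ':'] = true := by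
        simpa using hx
      rw [show pvStepB (chunks, cur) x = (chunks, cur ++ [pvRender x]) from by
            unfold pvStepB pvRender; rw [if_pos hx, if_pos hx],
          ih chunks (cur ++ [pvRender x]) (Or.inr (by simp))]
      rcases Decidable.em (cur = []) with hc | hc
      · subst hc
        rcases h with h | h
        · simp [pvG, hcx, pvFin, pvJ_new chunks (pvRender x) h, String.append_assoc]
        · exact absurd rfl h
      · have hflag : (!cur.isEmpty) = true := by cases cur <;> simp_all
        have hne : (!(cur ++ [pvRender x]).isEmpty) = true := by
          cases cur <;> simp
        simp [pvG, hcx, hflag, hne, pvFin, hc, pvJ_key chunks cur (pvRender x) hc, String.append_assoc]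
    | false =>
      have hcx : PySem.Chars.startswith x.toList ['i', 't', 'a', 'l', 'i', 'c', ':'] = false := by
        simpa using hx
      have hx' : ¬ (PySem.Str.startswith x "italic:" = true) := by simp [hcx]
      rw [show pvStepB (chunks, cur) x = (chunks ++ [cur ++ [pvRender x]], ([] : List String)) from by
            unfold pvStepB pvRender; rw [if_neg hx', if_neg hx'],
          ih (chunks ++ [cur ++ [pvRender x]]) [] (Or.inl (by simp))]
      rcases Decidable.em (cur = []) with hc | hc
      · subst hc
        rcases h with h | h
        · simp [pvG, hcx, pvFin, pvJ_new chunks (pvRender x) h, String.append_assoc]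
        · exact absurd rfl h
      · have hflag : (!cur.isEmpty) = true := by cases cur <;> simp_all
        simp [pvG, hcx, hflag, pvFin, hc, pvJ_key chunks cur (pvRender x) hc, String.append_assoc]

-- B on a nonempty list is the rendered head followed by pvG.
theorem pvB_char (l : String) (ls : List String) :
    h2_html_alt (l :: ls) = pvRender l ++ pvG (PySem.Str.startswith l "italic:") ls := by
  rw [pvAlt_eq, List.foldl_cons]
  cases hl : PySem.Str.startswith l "italic:" with
  | true =>
    rw [show pvStepB ([], []) l = ([], [pvRender l]) from by
          unfold pvStepB pvRender; rw [if_pos hl, if_pos hl]; rfl,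
        pvLoopB ls [] [pvRender l] (Or.inr (by simp))]
    simp [pvFin, pvJ, pvJoin_single]
  | false =>
    have hcl : PySem.Chars.startswith l.toList ['i', 't', 'a', 'l', 'i', 'c', ':'] = false := by
      simpa using hl
    have hl' : ¬ (PySem.Str.startswith l "italic:" = true) := by simp [hcl]
    rw [show pvStepB ([], []) l = ([[l]], ([] : List String)) from by
          unfold pvStepB; rw [if_neg hl']; simp,
        pvLoopB ls [[l]] [] (Or.inl (by simp))]
    have hr : pvRender l = l := by unfold pvRender; rw [if_neg hl']
    simp [pvFin, pvJ, pvJoin_single, hr]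

-- ===== VERDICT (by name: the statements are the Claim_ definitions above) =====
theorem h2_html_spec : Claim_equal_h2_html := by
  intro lines _ hpre
  unfold Spec_h2_html
  obtain ⟨l, ls, rfl⟩ : ∃ l ls, lines = l :: ls := by
    cases lines with
    | nil => exact absurd rfl hpre
    | cons a b => exact ⟨a, b, rfl⟩
  rw [pvA_char, pvB_char]
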